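-- pv_equiv track=rewrite | github.com/gportella/codewars_challenges | circular_genome_assembly/genome_assembly_codewars.py | linear_overlap_approx
-- ===== SOURCE A (Python) =====
-- from typing import List, Tuple, Optional
--
-- def hamming_mismatches(s1: str, s2: str, max_allowed: int = float("inf")) -> int:
--     mismatches = 0
--     for c1, c2 in zip(s1, s2):
--         if c1 != c2:
--             mismatches += 1
--             if mismatches > max_allowed:
--                 return mismatches
--     return mismatches
--
-- def linear_overlap_exact(a: str, b: str, min_length: int) -> int:
--     for olen in range(min(len(a), len(b)), min_length - 1, -1):
--         if a[-olen:] == b[:olen]: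
--             return olen
--     return 0
--
-- def linear_overlap_approx(
--     a: str, b: str, min_length: int, max_mismatches: int
-- ) -> Tuple[int, Optional[int]]:
--     if max_mismatches == 0:
--         return linear_overlap_exact(a, b, min_length), 0
--
--     best = (0, None)
--     for olen in range(min(len(a), len(b)), min_length - 1, -1):
--         mism = hamming_mismatches(a[-olen:], b[:olen], max_mismatches)
--         if mism <= max_mismatches:
--             if olen > best[0] or (
--                 olen == best[0] and (best[1] is None or mism < best[1])
--             ):
--                 best = (olen, mism)
--                 break
--     return best
-- ===== SOURCE B (Python) =====
-- # B: precompute per-diagonal match counts from a character-position index of b,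
-- # then read the best overlap straight off the table (no per-length slice comparison).
-- def linear_overlap_approx(a, b, min_length, max_mismatches):
--     la, lb = len(a), len(b)
--     # index: character -> list of its positions in b
--     pos = {}
--     for i, c in enumerate(b):
--         pos.setdefault(c, []).append(i)
--     # diag[s] = number of positions with a[j] == b[j - s] (matches on diagonal s);
--     # an overlap of length olen compares exactly the pairs on diagonal la - olen
--     diag = {}
--     for j, c in enumerate(a):
--         for i in pos.get(c, []):
--             diag[j - i] = diag.get(j - i, 0) + 1
--     m = min(la, lb)
--     if max_mismatches == 0:
--         olen = m
--         while olen >= max(min_length, 1):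
--             if diag.get(la - olen, 0) == olen:
--                 return olen, 0
--             olen -= 1
--         return 0, 0
--     olen = m
--     while olen >= max(min_length, 0):
--         d = olen - diag.get(la - olen, 0)
--         if d <= max_mismatches:
--             return olen, d
--         olen -= 1
--     return 0, None
-- ===== Notes on version B (the rewrite author's own statement) =====
-- stated objective: alternative
-- what changed: Replaced A's per-overlap-length suffix/prefix slice comparison (with an early-exit Hamming counter) by a character-position index of b and a precomputed diagonal match-count table (cross-correlation by counting equal-character index pairs), from which each overlap's mismatch count is read off.
-- intended difference: When max_mismatches == 0, min_length is negative, a is non-empty and no true overlap of length >= 1 exists, A's descending scan runs into negative 'overlap lengths' olen where a[-olen:]/b[:olen] no longer denote a suffix/prefix, and A returns a negative first component such as (-1, 0); B returns (0, 0), the intended 'no overlap' answer. — e.g. on linear_overlap_approx("a", "b", -1, 0): A returns (-1, some 0), B returns (0, some 0)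
import Mathlib
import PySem

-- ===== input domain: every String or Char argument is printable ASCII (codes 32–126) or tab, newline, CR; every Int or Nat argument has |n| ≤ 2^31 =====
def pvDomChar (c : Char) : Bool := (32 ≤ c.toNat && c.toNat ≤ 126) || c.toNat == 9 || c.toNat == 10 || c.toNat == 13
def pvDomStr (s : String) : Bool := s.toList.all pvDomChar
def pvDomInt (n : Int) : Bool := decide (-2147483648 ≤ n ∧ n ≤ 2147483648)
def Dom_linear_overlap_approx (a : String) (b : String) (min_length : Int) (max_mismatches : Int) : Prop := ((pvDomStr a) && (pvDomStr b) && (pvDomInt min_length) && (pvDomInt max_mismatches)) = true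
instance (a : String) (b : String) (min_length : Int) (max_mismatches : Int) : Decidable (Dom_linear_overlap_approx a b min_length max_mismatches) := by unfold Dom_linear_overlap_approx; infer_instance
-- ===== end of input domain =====

-- B precomputes a diagonal match-count table from a character-position index of b instead of
-- comparing a suffix slice with a prefix slice per overlap length; return values agree except on
-- the D_ corner below, where A returns a negative "overlap length".

-- ===== PORT A =====

-- hamming_mismatches: counter over zip(s1, s2) with early return once the count exceeds max_allowed
def pvHamGo (maxAllowed : Int) : List (Char × Char) → Int → Int
  | [], acc => acc
  | (c1, c2) :: rest, acc =>
    if c1 ≠ c2 then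
      if acc + 1 > maxAllowed then acc + 1 else pvHamGo maxAllowed rest (acc + 1)
    else pvHamGo maxAllowed rest acc

def pvHam (s1 s2 : List Char) (maxAllowed : Int) : Int :=
  pvHamGo maxAllowed (s1.zip s2) 0

-- linear_overlap_exact: 'for olen in range(min(len(a),len(b)), min_length-1, -1)' iterated lazily
-- (olen counts down while olen > stop, exactly like Python's range object), return at first slice equality
def pvExactLoop (ca cb : List Char) : Nat → Int → Int
  | 0, _ => 0
  | n + 1, olen =>
    if PySem.List.slice ca (some (-olen)) none = PySem.List.slice cb none (some olen) then olen
    else pvExactLoop ca cb n (olen - 1)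

def pvExact (ca cb : List Char) (min_length : Int) : Int :=
  pvExactLoop ca cb
    ((min (ca.length : Int) (cb.length : Int) - (min_length - 1)).toNat)
    (min (ca.length : Int) (cb.length : Int))

-- the main loop of linear_overlap_approx: state 'best', break right after the first accepted update
def pvApproxLoop (ca cb : List Char) (mm : Int) : Nat → Int → Int × Option Int → Int × Option Int
  | 0, _, best => best
  | n + 1, olen, best =>
    let mism := pvHam (PySem.List.slice ca (some (-olen)) none) (PySem.List.slice cb none (some olen)) mm
    if mism ≤ mm then
      if decide (olen > best.1) ||
          (decide (olen = best.1) &&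
            (best.2.isNone || (match best.2 with | some m => decide (mism < m) | none => false))) then
        (olen, some mism)          -- 'best = (olen, mism); break': the function returns this best
      else pvApproxLoop ca cb mm n (olen - 1) best
    else pvApproxLoop ca cb mm n (olen - 1) best

def linear_overlap_approx (a : String) (b : String) (min_length : Int) (max_mismatches : Int) : Int × Option Int :=
  if max_mismatches = 0 then
    (pvExact a.toList b.toList min_length, some 0)
  else
    pvApproxLoop a.toList b.toList max_mismatches
      ((min (a.toList.length : Int) (b.toList.length : Int) - (min_length - 1)).toNat)
      (min (a.toList.length : Int) (b.toList.length : Int))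
      (0, none)

-- ===== PORT B =====

-- pos: character -> list of its positions in b (pos.setdefault(c, []).append(i))
def pvPosIdx (cb : List Char) : PySem.Dict Char (List Int) :=
  (PySem.List.enumerate cb).foldl (fun d p => d.modify p.2 [] (fun l => l ++ [p.1])) PySem.Dict.empty

-- diag[s] = number of index pairs with a[j] == b[i] and j - i == s
def pvDiag (ca cb : List Char) : PySem.Dict Int Int :=
  let pos := pvPosIdx cb
  (PySem.List.enumerate ca).foldl
    (fun d q => (pos.getD q.2 []).foldl (fun d' i => d'.modify (q.1 - i) 0 (· + 1)) d)
    PySem.Dict.empty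

-- exact branch: while olen >= max(min_length, 1): if diag.get(la - olen, 0) == olen: return
def pvAltExactGo (la : Int) (diag : PySem.Dict Int Int) : List Int → Int
  | [] => 0
  | o :: rest => if diag.getD (la - o) 0 = o then o else pvAltExactGo la diag rest

-- approx branch: while olen >= max(min_length, 0): d = olen - diag.get(la - olen, 0); if d <= mm: return
def pvAltApproxGo (mm la : Int) (diag : PySem.Dict Int Int) : List Int → Int × Option Int
  | [] => (0, none)
  | o :: rest =>
    let d := o - diag.getD (la - o) 0
    if d ≤ mm then (o, some d) else pvAltApproxGo mm la diag rest

def linear_overlap_approx_alt (a : String) (b : String) (min_length : Int) (max_mismatches : Int) : Int × Option Int :=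
  let ca := a.toList
  let cb := b.toList
  let la : Int := ca.length
  let lb : Int := cb.length
  let diag := pvDiag ca cb
  let m : Int := min la lb
  if max_mismatches = 0 then
    (pvAltExactGo la diag (PySem.List.pyRange m (max min_length 1 - 1) (-1)), some 0)
  else
    pvAltApproxGo max_mismatches la diag (PySem.List.pyRange m (max min_length 0 - 1) (-1))

-- ===== PRECONDITION & SPEC =====

-- When max_mismatches == 0, min_length ≤ -1, a is non-empty and no true overlap of length ≥ 1 exists
-- but some negative olen makes a[-olen:] == b[:olen] (slices that are no suffix/prefix of an overlap),
-- A returns that negative olen (e.g. (-1, 0)); B returns (0, 0), the intended "no overlap" answer.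
def D_linear_overlap_approx (a : String) (b : String) (min_length : Int) (max_mismatches : Int) : Prop :=
  max_mismatches = 0 ∧ min_length ≤ -1 ∧ a.toList ≠ [] ∧
  ((PySem.List.pyRange 1 (min (a.toList.length : Int) (b.toList.length : Int) + 1) 1).all
      (fun o => !decide (PySem.List.slice a.toList (some (-o)) none = PySem.List.slice b.toList none (some o)))) = true ∧
  ((PySem.List.pyRange (max min_length (-(max (a.toList.length : Int) (b.toList.length : Int)))) 0 1).any
      (fun o => decide (PySem.List.slice a.toList (some (-o)) none = PySem.List.slice b.toList none (some o)))) = true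

instance (a : String) (b : String) (min_length : Int) (max_mismatches : Int) : Decidable (D_linear_overlap_approx a b min_length max_mismatches) := by unfold D_linear_overlap_approx; infer_instance

def Spec_linear_overlap_approx (a : String) (b : String) (min_length : Int) (max_mismatches : Int) (out : Int × Option Int) : Prop := ¬ D_linear_overlap_approx a b min_length max_mismatches → out = linear_overlap_approx_alt a b min_length max_mismatches
instance (a : String) (b : String) (min_length : Int) (max_mismatches : Int) (out : Int × Option Int) : Decidable (Spec_linear_overlap_approx a b min_length max_mismatches out) := by unfold Spec_linear_overlap_approx; infer_instance

def pvDiffWitness_linear_overlap_approx : String × String × Int × Int := ("a", "b", -1, 0)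
def pvDiffWitnessOut_linear_overlap_approx : (Int × Option Int) × (Int × Option Int) := ((-1, some 0), (0, some 0))

-- ===== CLAIM (what is proved, stated in full; the proofs are below) =====
def Claim_unchanged_linear_overlap_approx : Prop := ∀ (a : String) (b : String) (min_length : Int) (max_mismatches : Int), Dom_linear_overlap_approx a b min_length max_mismatches → Spec_linear_overlap_approx a b min_length max_mismatches (linear_overlap_approx a b min_length max_mismatches)
def Claim_changed_linear_overlap_approx : Prop := Dom_linear_overlap_approx (pvDiffWitness_linear_overlap_approx.1) (pvDiffWitness_linear_overlap_approx.2.1) (pvDiffWitness_linear_overlap_approx.2.2.1) (pvDiffWitness_linear_overlap_approx.2.2.2) ∧ D_linear_overlap_approx (pvDiffWitness_linear_overlap_approx.1) (pvDiffWitness_linear_overlap_approx.2.1) (pvDiffWitness_linear_overlap_approx.2.2.1) (pvDiffWitness_linear_overlap_approx.2.2.2) ∧ linear_overlap_approx (pvDiffWitness_linear_overlap_approx.1) (pvDiffWitness_linear_overlap_approx.2.1) (pvDiffWitness_linear_overlap_approx.2.2.1) (pvDiffWitness_linear_overlap_approx.2.2.2) = pvDiffWitnessOut_linear_overlap_approx.1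 ∧ linear_overlap_approx_alt (pvDiffWitness_linear_overlap_approx.1) (pvDiffWitness_linear_overlap_approx.2.1) (pvDiffWitness_linear_overlap_approx.2.2.1) (pvDiffWitness_linear_overlap_approx.2.2.2) = pvDiffWitnessOut_linear_overlap_approx.2 ∧ pvDiffWitnessOut_linear_overlap_approx.1 ≠ pvDiffWitnessOut_linear_overlap_approx.2
def Claim_exact_linear_overlap_approx : Prop := ∀ (a : String) (b : String) (min_length : Int) (max_mismatches : Int), Dom_linear_overlap_approx a b min_length max_mismatches → D_linear_overlap_approx a b min_length max_mismatches → linear_overlap_approx a b min_length max_mismatches ≠ linear_overlap_approx_alt a b min_length max_mismatches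

-- ===== LEMMAS AND PROOFS =====

-- ---- list form of A's descending loops (the proofs reason over the materialised range) ----
def pvExactGo (ca cb : List Char) : List Int → Int
  | [] => 0
  | olen :: rest =>
    if PySem.List.slice ca (some (-olen)) none = PySem.List.slice cb none (some olen) then olen
    else pvExactGo ca cb rest

def pvApproxGo (ca cb : List Char) (mm : Int) : List Int → Int × Option Int → Int × Option Int
  | [], best => best
  | olen :: rest, best =>
    let mism := pvHam (PySem.List.slice ca (some (-olen)) none) (PySem.List.slice cb none (some olen)) mm
    if mism ≤ mm then
      if decide (olen > best.1) ||
          (decide (olen = best.1) &&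
            (best.2.isNone || (match best.2 with | some m => decide (mism < m) | none => false))) then
        (olen, some mism)
      else pvApproxGo ca cb mm rest best
    else pvApproxGo ca cb mm rest best

theorem pv_range_asc_nil (a b : Int) (h : b ≤ a) : PySem.List.pyRange a b 1 = [] := by
  rw [List.eq_nil_iff_forall_not_mem]
  intro x hx
  have := PySem.List.mem_pyRange_one.mp hx
  omega

theorem pv_range_down_nil (o s : Int) (h : o ≤ s) : PySem.List.pyRange o s (-1) = [] := by
  rw [PySem.List.pyRange_neg_one_eq_reverse, List.reverse_eq_nil_iff, List.eq_nil_iff_forall_not_mem]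
  intro x hx
  have := PySem.List.mem_pyRange_one.mp hx
  omega

theorem pv_range_down_cons (o s : Int) (h : s < o) :
    PySem.List.pyRange o s (-1) = o :: PySem.List.pyRange (o - 1) s (-1) := by
  rw [PySem.List.pyRange_neg_one_eq_reverse, PySem.List.pyRange_neg_one_eq_reverse]
  rw [show o - 1 + 1 = o by ring]
  have h1 : PySem.List.pyRange (s + 1) (o + 1) 1
      = PySem.List.pyRange (s + 1) o 1 ++ PySem.List.pyRange o (o + 1) 1 :=
    PySem.List.pyRange_one_append (s + 1) o (o + 1) (by omega) (by omega)
  have h2 : PySem.List.pyRange o (o + 1) 1 = [o] := by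
    rw [PySem.List.pyRange_one_cons (by omega), pv_range_asc_nil (o + 1) (o + 1) (le_refl _)]
  rw [h1, h2, List.reverse_append]
  rfl

theorem pvExactLoop_eq (ca cb : List Char) (s : Int) :
    ∀ (n : Nat) (o : Int), (o - s).toNat = n →
      pvExactLoop ca cb n o = pvExactGo ca cb (PySem.List.pyRange o s (-1)) := by
  intro n
  induction n with
  | zero =>
    intro o hn
    have h : o ≤ s := by omega
    rw [pv_range_down_nil o s h]
    rfl
  | succ k ih =>
    intro o hn
    have h : s < o := by omega
    rw [pv_range_down_cons o s h]
    simp only [pvExactLoop, pvExactGo, ih (o - 1) (by omega)]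

theorem pvApproxLoop_eq (ca cb : List Char) (mm s : Int) :
    ∀ (n : Nat) (o : Int) (best : Int × Option Int), (o - s).toNat = n →
      pvApproxLoop ca cb mm n o best = pvApproxGo ca cb mm (PySem.List.pyRange o s (-1)) best := by
  intro n
  induction n with
  | zero =>
    intro o best hn
    have h : o ≤ s := by omega
    rw [pv_range_down_nil o s h]
    rfl
  | succ k ih =>
    intro o best hn
    have h : s < o := by omega
    rw [pv_range_down_cons o s h]
    simp only [pvApproxLoop, pvApproxGo, ih (o - 1) best (by omega)]

-- ---- A-side counting (plain mismatch count of a zipped pair list) ----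
def pvCnt (l : List (Char × Char)) : Int :=
  (l.map (fun p => if p.1 ≠ p.2 then (1 : Int) else 0)).sum

theorem pvCnt_nonneg (l : List (Char × Char)) : 0 ≤ pvCnt l := by
  induction l with
  | nil => simp [pvCnt]
  | cons p t ih =>
    by_cases h : p.1 ≠ p.2 <;> simp [pvCnt, h] at * <;> omega

theorem pvHamGo_eq_of_le (mm : Int) :
    ∀ (l : List (Char × Char)) (acc : Int), acc + pvCnt l ≤ mm → pvHamGo mm l acc = acc + pvCnt l := by
  intro l
  induction l with
  | nil => intro acc h; simp [pvHamGo, pvCnt]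
  | cons p t ih =>
    obtain ⟨c1, c2⟩ := p
    intro acc h
    have hnn := pvCnt_nonneg t
    by_cases hp : c1 ≠ c2
    · have hc : pvCnt ((c1, c2) :: t) = 1 + pvCnt t := by simp [pvCnt, hp]
      rw [hc] at h ⊢
      have hgt : ¬ (acc + 1 > mm) := by omega
      rw [pvHamGo, if_pos hp, if_neg hgt, ih (acc + 1) (by omega)]
      ring
    · have hc : pvCnt ((c1, c2) :: t) = pvCnt t := by simp [pvCnt, hp]
      rw [hc] at h ⊢
      rw [pvHamGo, if_neg hp, ih acc h]

theorem pvHamGo_gt (mm : Int) :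
    ∀ (l : List (Char × Char)) (acc : Int), mm < acc + pvCnt l → mm < pvHamGo mm l acc := by
  intro l
  induction l with
  | nil => intro acc h; simpa [pvHamGo, pvCnt] using h
  | cons p t ih =>
    obtain ⟨c1, c2⟩ := p
    intro acc h
    by_cases hp : c1 ≠ c2
    · have hc : pvCnt ((c1, c2) :: t) = 1 + pvCnt t := by simp [pvCnt, hp]
      rw [hc] at h
      rw [pvHamGo, if_pos hp]
      by_cases hgt : acc + 1 > mm
      · rw [if_pos hgt]; omega
      · rw [if_neg hgt]; exact ih (acc + 1) (by omega)
    · have hc : pvCnt ((c1, c2) :: t) = pvCnt t := by simp [pvCnt, hp]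
      rw [hc] at h
      rw [pvHamGo, if_neg hp]
      exact ih acc h

theorem pvHam_le_iff (s1 s2 : List Char) (mm : Int) :
    pvHam s1 s2 mm ≤ mm ↔ pvCnt (s1.zip s2) ≤ mm := by
  constructor
  · intro h
    by_contra hc
    have := pvHamGo_gt mm (s1.zip s2) 0 (by omega)
    unfold pvHam at h
    omega
  · intro h
    unfold pvHam
    rw [pvHamGo_eq_of_le mm _ 0 (by omega)]
    omega

theorem pvHam_eq_of_le (s1 s2 : List Char) (mm : Int) (h : pvCnt (s1.zip s2) ≤ mm) :
    pvHam s1 s2 mm = pvCnt (s1.zip s2) := by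
  unfold pvHam
  rw [pvHamGo_eq_of_le mm _ 0 (by omega)]
  omega

-- ---- find?-form of the four scans ----
theorem pvExactGo_spec (ca cb : List Char) :
    ∀ R : List Int,
      pvExactGo ca cb R
        = ((R.find? (fun o => decide (PySem.List.slice ca (some (-o)) none = PySem.List.slice cb none (some o)))).getD 0) := by
  intro R
  induction R with
  | nil => simp [pvExactGo]
  | cons o t ih =>
    by_cases h : PySem.List.slice ca (some (-o)) none = PySem.List.slice cb none (some o)
    · simp [pvExactGo, List.find?, h]
    · simp [pvExactGo, List.find?, h, ih]

theorem pvApproxGo_spec (ca cb : List Char) (mm : Int) :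
    ∀ R : List Int,
      pvApproxGo ca cb mm R ((0 : Int), (none : Option Int))
        = ((R.find? (fun o =>
              decide (pvHam (PySem.List.slice ca (some (-o)) none) (PySem.List.slice cb none (some o)) mm ≤ mm)
                && decide (0 ≤ o))).map
            (fun o => (o, some (pvHam (PySem.List.slice ca (some (-o)) none) (PySem.List.slice cb none (some o)) mm)))).getD
            ((0 : Int), (none : Option Int)) := by
  intro R
  induction R with
  | nil => simp [pvApproxGo]
  | cons o t ih =>
    by_cases hm : pvHam (PySem.List.slice ca (some (-o)) none) (PySem.List.slice cb none (some o)) mm ≤ mm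
    · by_cases ho : 0 ≤ o
      · simp [pvApproxGo, List.find?, hm, ho]
        intro h1 h2
        omega
      · have h1 : ¬ (o > (0:Int)) := by omega
        have h2 : ¬ (o = (0:Int)) := by omega
        simp [pvApproxGo, List.find?, hm, ho, h1, h2, ih]
    · simp [pvApproxGo, List.find?, hm, ih]

theorem pvAltExactGo_spec (la : Int) (diag : PySem.Dict Int Int) :
    ∀ R : List Int,
      pvAltExactGo la diag R = ((R.find? (fun o => decide (diag.getD (la - o) 0 = o))).getD 0) := by
  intro R
  induction R with
  | nil => simp [pvAltExactGo]
  | cons o t ih =>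
    by_cases h : diag.getD (la - o) 0 = o
    · simp [pvAltExactGo, List.find?, h]
    · simp [pvAltExactGo, List.find?, h, ih]

theorem pvAltApproxGo_spec (mm la : Int) (diag : PySem.Dict Int Int) :
    ∀ R : List Int,
      pvAltApproxGo mm la diag R
        = ((R.find? (fun o => decide (o - diag.getD (la - o) 0 ≤ mm))).map
            (fun o => (o, some (o - diag.getD (la - o) 0)))).getD ((0 : Int), (none : Option Int)) := by
  intro R
  induction R with
  | nil => simp [pvAltApproxGo]
  | cons o t ih =>
    by_cases h : o - diag.getD (la - o) 0 ≤ mm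
    · simp [pvAltApproxGo, List.find?, h]
    · simp [pvAltApproxGo, List.find?, h, ih]

theorem pv_find?_congr_mem {p q : Int → Bool} :
    ∀ (L : List Int), (∀ x ∈ L, p x = q x) → L.find? p = L.find? q := by
  intro L
  induction L with
  | nil => intro _; simp
  | cons a t ih =>
    intro h
    have ha := h a (List.mem_cons_self)
    by_cases hqa : q a = true
    · simp [List.find?, ha, hqa]
    · have hfa : q a = false := by simpa using hqa
      simp [List.find?, ha, hfa, ih (fun x hx => h x (List.mem_cons_of_mem _ hx))]

-- clamping the ascending scan at 0: the negative olens of A's descending scan come after 0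
-- and are rejected by its 'olen > best[0] or olen == best[0]' test, so neither side sees them
theorem pv_find_clamp (ml M : Int) (hM : 0 ≤ M) (q : Int → Bool) :
    ((PySem.List.pyRange ml (M + 1) 1).reverse.find? (fun o => q o && decide (0 ≤ o)))
      = ((PySem.List.pyRange (max ml 0) (M + 1) 1).reverse.find? q) := by
  by_cases hml : 0 ≤ ml
  · rw [max_eq_left hml]
    apply pv_find?_congr_mem
    intro x hx
    rw [List.mem_reverse] at hx
    have h0 : ml ≤ x := (PySem.List.mem_pyRange_one.mp hx).1
    have h0' : (0 : Int) ≤ x := by omega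
    simp [h0']
  · rw [max_eq_right (by omega : ml ≤ 0)]
    have h1 : PySem.List.pyRange ml (M + 1) 1
        = PySem.List.pyRange ml 0 1 ++ PySem.List.pyRange 0 (M + 1) 1 :=
      PySem.List.pyRange_one_append ml 0 (M + 1) (by omega) (by omega)
    rw [h1, List.reverse_append, List.find?_append]
    have hA : (PySem.List.pyRange 0 (M + 1) 1).reverse.find? (fun o => q o && decide (0 ≤ o))
        = (PySem.List.pyRange 0 (M + 1) 1).reverse.find? q := by
      apply pv_find?_congr_mem
      intro x hx
      rw [List.mem_reverse] at hx
      have h0 : (0 : Int) ≤ x := (PySem.List.mem_pyRange_one.mp hx).1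
      simp [h0]
    have hB : (PySem.List.pyRange ml 0 1).reverse.find? (fun o => q o && decide (0 ≤ o)) = none := by
      rw [List.find?_eq_none]
      intro x hx
      rw [List.mem_reverse] at hx
      have hneg : x < 0 := (PySem.List.mem_pyRange_one.mp hx).2
      have hx0 : ¬ (0 : Int) ≤ x := by omega
      simp [hx0]
    rw [hA, hB, Option.or_none]

-- ---- characterising the diagonal table ----
def pvKeyList (ca cb : List Char) : List Int :=
  (PySem.List.enumerate ca).flatMap
    (fun q => (((PySem.List.enumerate cb).filter (fun p => p.2 == q.2)).map (fun p => p.1)).map (fun i => q.1 - i))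

theorem pvPosIdx_getD (cb : List Char) (c : Char) :
    (pvPosIdx cb).getD c [] = ((PySem.List.enumerate cb).filter (fun p => p.2 == c)).map (fun p => p.1) := by
  have h1 : pvPosIdx cb
      = ((PySem.List.enumerate cb).map (fun p => (p.2, p.1))).foldl
          (fun d p => d.modify p.1 [] (fun l => l ++ [p.2])) PySem.Dict.empty := by
    unfold pvPosIdx
    rw [List.foldl_map]
  rw [h1, PySem.Dict.getD_foldl_modify_append]
  simp [List.filter_map, List.map_map, Function.comp_def]

theorem pvDiag_eq (ca cb : List Char) :
    pvDiag ca cb = (pvKeyList ca cb).foldl (fun d x => d.modify x 0 (· + 1)) PySem.Dict.empty := by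
  unfold pvDiag pvKeyList
  rw [List.foldl_flatMap]
  apply PySem.List.foldl_congr_mem
  intro acc q _
  rw [pvPosIdx_getD, List.foldl_map, List.map_map, List.foldl_map]
  simp [Function.comp_def]

theorem pvDiag_getD (ca cb : List Char) (s : Int) :
    (pvDiag ca cb).getD s 0 = ((pvKeyList ca cb).count s : Int) := by
  rw [pvDiag_eq, PySem.Dict.getD_foldl_modify_add_one]
  simp

theorem pv_count_shift (l : List Int) (c s : Int) :
    List.count s (l.map (fun i => c - i)) = List.count (c - s) l := by
  induction l with
  | nil => rfl
  | cons x t ih =>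
    simp only [List.map_cons, List.count_cons, ih]
    congr 1
    by_cases h : x = c - s
    · subst h
      simp [show c - (c - s) = s by ring]
    · have h2 : ¬ (c - x = s) := fun hc => h (by omega)
      simp [h, h2]

theorem pv_count_fst (L : List (Int × Char)) (v : Int) :
    List.count v (L.map (fun p => p.1)) = L.countP (fun p => p.1 == v) := by
  induction L with
  | nil => rfl
  | cons p t ih => simp [List.count_cons, List.countP_cons, ih]

theorem pvKeyList_count (ca cb : List Char) (s : Int) :
    (pvKeyList ca cb).count s
      = ((PySem.List.enumerate ca).map
          (fun q => (PySem.List.enumerate cb).countP (fun p => p.2 == q.2 && p.1 == q.1 - s))).sum := by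
  unfold pvKeyList
  rw [List.count_flatMap]
  congr 1
  apply List.map_congr_left
  intro q _
  simp only [Function.comp]
  rw [pv_count_shift, pv_count_fst, List.countP_filter]
  apply List.countP_congr
  intro p _
  rw [Bool.and_comm]

-- per-index occurrence count
def pvIdxCnt : List Char → Int → Char → Nat
  | [], _, _ => 0
  | y :: ys, v, c => if v = 0 then (if y = c then 1 else 0) else if v < 0 then 0 else pvIdxCnt ys (v - 1) c

theorem pvIdxCnt_neg (cb : List Char) (v : Int) (c : Char) (h : v < 0) : pvIdxCnt cb v c = 0 := by
  cases cb with
  | nil => rfl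
  | cons y ys =>
    have h0 : ¬ v = 0 := by omega
    simp [pvIdxCnt, h0, h]

theorem pv_enum_countP (cb : List Char) (c : Char) :
    ∀ (start v : Int),
      (PySem.List.enumerate cb start).countP (fun p => p.2 == c && p.1 == v) = pvIdxCnt cb (v - start) c := by
  induction cb with
  | nil => intro start v; simp [PySem.List.enumerate, pvIdxCnt]
  | cons y ys ih =>
    intro start v
    rw [show PySem.List.enumerate (y :: ys) start = (start, y) :: PySem.List.enumerate ys (start + 1) from rfl]
    rw [List.countP_cons, ih (start + 1) v]
    by_cases hv : v = start
    · subst hv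
      have hz : v - v = 0 := by omega
      have hneg : v - (v + 1) < 0 := by omega
      rw [pvIdxCnt_neg ys _ c hneg]
      by_cases hy : y = c
      · simp [pvIdxCnt, hz, hy]
      · simp [pvIdxCnt, hz, hy]
    · have hne : v - start ≠ 0 := by omega
      have harith : v - (start + 1) = v - start - 1 := by omega
      rw [harith]
      by_cases hlt : v - start < 0
      · rw [pvIdxCnt_neg ys _ c (by omega)]
        cases hy : (y == c) <;> simp [pvIdxCnt, hne, hlt, hv, hy, Ne.symm hv]
      · cases hy : (y == c) <;> simp [pvIdxCnt, hne, hlt, hv, hy, Ne.symm hv]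

def pvMatch : List Char → List Char → Nat
  | x :: xs, y :: ys => (if y = x then 1 else 0) + pvMatch xs ys
  | _, _ => 0

def pvHead1 : List Char → Char → Nat
  | [], _ => 0
  | y :: _, c => if y = c then 1 else 0

theorem pvIdxCnt_nat (c : Char) : ∀ (cb : List Char) (k : Nat), pvIdxCnt cb (k : Int) c = pvHead1 (cb.drop k) c := by
  intro cb
  induction cb with
  | nil => intro k; simp [pvIdxCnt, pvHead1]
  | cons y ys ih =>
    intro k
    cases k with
    | zero => simp [pvIdxCnt, pvHead1]
    | succ n =>
      have h0 : ((n + 1 : Nat) : Int) ≠ 0 := by omega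
      have h1 : ¬ ((n + 1 : Nat) : Int) < 0 := by omega
      have h2 : ((n + 1 : Nat) : Int) - 1 = (n : Int) := by omega
      show (if ((n + 1 : Nat) : Int) = 0 then (if y = c then 1 else 0)
        else if ((n + 1 : Nat) : Int) < 0 then 0 else pvIdxCnt ys (((n + 1 : Nat) : Int) - 1) c)
        = pvHead1 ((y :: ys).drop (n + 1)) c
      rw [if_neg h0, if_neg h1, h2, ih n, List.drop_succ_cons]

def pvMatchAt (cb : List Char) : Int → List Char → Nat
  | _, [] => 0
  | v, c :: rest => pvIdxCnt cb v c + pvMatchAt cb (v + 1) rest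

theorem pv_sum_enum (cb : List Char) (s : Int) :
    ∀ (ca : List Char) (start : Int),
      ((PySem.List.enumerate ca start).map
          (fun q => (PySem.List.enumerate cb).countP (fun p => p.2 == q.2 && p.1 == q.1 - s))).sum
        = pvMatchAt cb (start - s) ca := by
  intro ca
  induction ca with
  | nil => intro start; rfl
  | cons c rest ih =>
    intro start
    rw [show PySem.List.enumerate (c :: rest) start = (start, c) :: PySem.List.enumerate rest (start + 1) from rfl]
    rw [List.map_cons, List.sum_cons, ih (start + 1)]
    show (PySem.List.enumerate cb 0).countP _ + _ = _
    rw [pv_enum_countP cb c 0 (start - s)]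
    have h1 : start - s - 0 = start - s := by omega
    have h2 : start + 1 - s = start - s + 1 := by omega
    rw [h1, h2]
    rfl

theorem pvMatchAt_nat (cb : List Char) : ∀ (ca : List Char) (k : Nat), pvMatchAt cb (k : Int) ca = pvMatch ca (cb.drop k) := by
  intro ca
  induction ca with
  | nil => intro k; cases cb.drop k <;> rfl
  | cons c rest ih =>
    intro k
    show pvIdxCnt cb (k : Int) c + pvMatchAt cb ((k : Int) + 1) rest = _
    have hk1 : ((k : Int) + 1) = ((k + 1 : Nat) : Int) := by omega
    rw [hk1, ih (k + 1), pvIdxCnt_nat c cb k]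
    cases hdk : cb.drop k with
    | nil =>
      have h2 : cb.drop (k + 1) = [] := by
        rw [← List.tail_drop, hdk]
        rfl
      rw [h2]
      simp [pvHead1, pvMatch]
    | cons y t =>
      have h2 : cb.drop (k + 1) = t := by
        rw [← List.tail_drop, hdk]
        rfl
      rw [h2]
      simp [pvHead1, pvMatch]

theorem pvMatchAt_negshift (cb : List Char) :
    ∀ (ca : List Char) (k : Nat), pvMatchAt cb (-(k : Int)) ca = pvMatch (ca.drop k) cb := by
  intro ca
  induction ca with
  | nil => intro k; rw [List.drop_nil]; cases cb <;> rfl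
  | cons c rest ih =>
    intro k
    cases k with
    | zero =>
      show pvMatchAt cb (-(0 : Int)) (c :: rest) = pvMatch (c :: rest) cb
      rw [show (-(0:Int)) = ((0 : Nat) : Int) by omega, pvMatchAt_nat]
      rfl
    | succ n =>
      show pvIdxCnt cb (-((n + 1 : Nat) : Int)) c + pvMatchAt cb (-((n + 1 : Nat) : Int) + 1) rest = _
      rw [pvIdxCnt_neg cb _ c (by omega)]
      have h1 : -((n + 1 : Nat) : Int) + 1 = -(n : Int) := by omega
      rw [h1, ih n]
      simp [List.drop_succ_cons]

theorem pvDiag_getD_match (ca cb : List Char) (s : Int) (hs : 0 ≤ s) :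
    (pvDiag ca cb).getD s 0 = (pvMatch (ca.drop s.toNat) cb : Int) := by
  rw [pvDiag_getD, pvKeyList_count, pv_sum_enum]
  have h1 : (0 : Int) - s = -((s.toNat : Nat) : Int) := by omega
  rw [h1, pvMatchAt_negshift]

-- ---- bridging counts with A's zipped slices ----
theorem pv_cnt_add_match : ∀ (xs ys : List Char),
    pvCnt (xs.zip ys) + (pvMatch xs ys : Int) = ((min xs.length ys.length : Nat) : Int) := by
  intro xs
  induction xs with
  | nil => intro ys; simp [pvCnt, pvMatch]
  | cons x xs' ih =>
    intro ys
    cases ys with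
    | nil => simp [pvCnt, pvMatch]
    | cons y ys' =>
      have := ih ys'
      by_cases h : x = y
      · have hm : pvMatch (x :: xs') (y :: ys') = 1 + pvMatch xs' ys' := by
          simp [pvMatch, h]
        have hc : pvCnt ((x :: xs').zip (y :: ys')) = pvCnt (xs'.zip ys') := by
          simp [pvCnt, h]
        rw [hm, hc]
        simp only [List.length_cons] at *
        push_cast at *
        omega
      · have hm : pvMatch (x :: xs') (y :: ys') = pvMatch xs' ys' := by
          simp [pvMatch]
          intro hy; exact absurd hy.symm h
        have hc : pvCnt ((x :: xs').zip (y :: ys')) = 1 + pvCnt (xs'.zip ys') := by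
          simp [pvCnt, h]
        rw [hm, hc]
        simp only [List.length_cons] at *
        push_cast at *
        omega

theorem pvMatch_take : ∀ (xs ys : List Char) (n : Nat), xs.length ≤ n → pvMatch xs (ys.take n) = pvMatch xs ys := by
  intro xs
  induction xs with
  | nil => intro ys n _; cases ys.take n <;> cases ys <;> rfl
  | cons x xs' ih =>
    intro ys n h
    cases ys with
    | nil => simp [pvMatch]
    | cons y ys' =>
      cases n with
      | zero => simp at h
      | succ n' =>
        simp only [List.take_succ_cons]
        show (if y = x then 1 else 0) + pvMatch xs' (ys'.take n') = (if y = x then 1 else 0) + pvMatch xs' ys'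
        rw [ih ys' n' (by simpa using h)]

theorem pv_cnt_zero_iff : ∀ (xs ys : List Char), xs.length = ys.length → (pvCnt (xs.zip ys) = 0 ↔ xs = ys) := by
  intro xs
  induction xs with
  | nil => intro ys h; cases ys <;> simp_all [pvCnt]
  | cons x xs' ih =>
    intro ys h
    cases ys with
    | nil => simp at h
    | cons y ys' =>
      have hlen : xs'.length = ys'.length := by simpa using h
      have hnn := pvCnt_nonneg (xs'.zip ys')
      by_cases hxy : x = y
      · have hc : pvCnt ((x :: xs').zip (y :: ys')) = pvCnt (xs'.zip ys') := by simp [pvCnt, hxy]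
        rw [hc]
        constructor
        · intro h0; rw [hxy]; rw [(ih ys' hlen).mp h0]
        · intro he
          have : xs' = ys' := by injection he
          exact (ih ys' hlen).mpr this
      · have hc : pvCnt ((x :: xs').zip (y :: ys')) = 1 + pvCnt (xs'.zip ys') := by simp [pvCnt, hxy]
        rw [hc]
        constructor
        · intro h0; omega
        · intro he; injection he with h1 _; exact absurd h1 hxy

-- slice normal forms in the relevant range
theorem pv_sliceA (ca : List Char) (o : Int) (h1 : 1 ≤ o) (h2 : o ≤ (ca.length : Int)) :
    PySem.List.slice ca (some (-o)) none = ca.drop (((ca.length : Int) - o).toNat) := by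
  have ho : o = ((o.toNat : Nat) : Int) := by omega
  rw [ho, PySem.List.slice_from_neg_natCast ca o.toNat (by omega)]
  congr 1
  omega

theorem pv_sliceB (cb : List Char) (o : Int) (h0 : 0 ≤ o) :
    PySem.List.slice cb none (some o) = cb.take o.toNat := by
  exact PySem.List.slice_to cb h0

theorem pv_len_dropA (ca : List Char) (o : Int) (h1 : 1 ≤ o) (h2 : o ≤ (ca.length : Int)) :
    (ca.drop (((ca.length : Int) - o).toNat)).length = o.toNat := by
  simp [List.length_drop]
  omega

-- key equivalence: A's mismatch count of the zipped slices vs the diag table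
theorem pv_key_eq (ca cb : List Char) (o : Int) (h1 : 1 ≤ o)
    (h2 : o ≤ min (ca.length : Int) (cb.length : Int)) :
    pvCnt ((PySem.List.slice ca (some (-o)) none).zip (PySem.List.slice cb none (some o)))
      = o - (pvDiag ca cb).getD ((ca.length : Int) - o) 0 := by
  have hla : o ≤ (ca.length : Int) := le_trans h2 (min_le_left _ _)
  have hlb : o ≤ (cb.length : Int) := le_trans h2 (min_le_right _ _)
  rw [pv_sliceA ca o h1 hla, pv_sliceB cb o (by omega),
      pvDiag_getD_match ca cb _ (by omega)]
  set k : Nat := ((ca.length : Int) - o).toNat with hk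
  have hlen : (ca.drop k).length = o.toNat := pv_len_dropA ca o h1 hla
  have hmt : pvMatch (ca.drop k) (cb.take o.toNat) = pvMatch (ca.drop k) cb := by
    apply pvMatch_take
    omega
  have hsum := pv_cnt_add_match (ca.drop k) (cb.take o.toNat)
  have hmin : min (ca.drop k).length (cb.take o.toNat).length = o.toNat := by
    simp [hlen, List.length_take]
    omega
  rw [hmin] at hsum
  rw [← hmt]
  omega

-- the o = 0 entries agree as well
theorem pv_zero_hamA (ca cb : List Char) (mm : Int) :
    pvHam (PySem.List.slice ca (some (-(0:Int))) none) (PySem.List.slice cb none (some (0:Int))) mm = 0 := by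
  have hB : PySem.List.slice cb none (some (0:Int)) = [] := by
    rw [pv_sliceB cb 0 (by omega)]
    simp
  rw [hB]
  simp [pvHam, pvHamGo]

theorem pv_zero_diagB (ca cb : List Char) :
    (pvDiag ca cb).getD ((ca.length : Int) - 0) 0 = 0 := by
  rw [sub_zero, pvDiag_getD_match ca cb _ (by omega),
      show ((ca.length : Int)).toNat = ca.length by omega, List.drop_length]
  cases cb <;> simp [pvMatch]

-- exact-branch predicate equivalence on 1 ≤ o ≤ m
theorem pv_exact_pred_eq (ca cb : List Char) (o : Int) (h1 : 1 ≤ o)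
    (h2 : o ≤ min (ca.length : Int) (cb.length : Int)) :
    decide (PySem.List.slice ca (some (-o)) none = PySem.List.slice cb none (some o))
      = decide ((pvDiag ca cb).getD ((ca.length : Int) - o) 0 = o) := by
  have hla : o ≤ (ca.length : Int) := le_trans h2 (min_le_left _ _)
  have hlb : o ≤ (cb.length : Int) := le_trans h2 (min_le_right _ _)
  have hkey := pv_key_eq ca cb o h1 h2
  have hlen : (PySem.List.slice ca (some (-o)) none).length = (PySem.List.slice cb none (some o)).length := by
    rw [pv_sliceA ca o h1 hla, pv_sliceB cb o (by omega)]
    rw [pv_len_dropA ca o h1 hla]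
    simp [List.length_take]
    omega
  have hiff := pv_cnt_zero_iff _ _ hlen
  have hnn := pvCnt_nonneg ((PySem.List.slice ca (some (-o)) none).zip (PySem.List.slice cb none (some o)))
  by_cases hs : PySem.List.slice ca (some (-o)) none = PySem.List.slice cb none (some o)
  · have h0 : pvCnt _ = 0 := hiff.mpr hs
    rw [h0] at hkey
    simp [hs]
    omega
  · have h0 : ¬ pvCnt ((PySem.List.slice ca (some (-o)) none).zip (PySem.List.slice cb none (some o))) = 0 :=
      fun hc => hs (hiff.mp hc)
    simp [hs]
    omega

-- approx-branch predicate equivalence on 0 ≤ o ≤ m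
theorem pv_approx_pred_eq (ca cb : List Char) (mm : Int) (o : Int) (h0 : 0 ≤ o)
    (h2 : o ≤ min (ca.length : Int) (cb.length : Int)) :
    decide (pvHam (PySem.List.slice ca (some (-o)) none) (PySem.List.slice cb none (some o)) mm ≤ mm)
      = decide (o - (pvDiag ca cb).getD ((ca.length : Int) - o) 0 ≤ mm) := by
  by_cases h1 : 1 ≤ o
  · have := pvHam_le_iff (PySem.List.slice ca (some (-o)) none) (PySem.List.slice cb none (some o)) mm
    rw [pv_key_eq ca cb o h1 h2] at this
    simp only [decide_eq_decide]
    exact this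
  · have ho : o = 0 := by omega
    subst ho
    rw [pv_zero_hamA ca cb mm, pv_zero_diagB ca cb]
    norm_num

-- the accepted value agrees too
theorem pv_approx_val_eq (ca cb : List Char) (mm : Int) (o : Int) (h0 : 0 ≤ o)
    (h2 : o ≤ min (ca.length : Int) (cb.length : Int))
    (hacc : o - (pvDiag ca cb).getD ((ca.length : Int) - o) 0 ≤ mm) :
    pvHam (PySem.List.slice ca (some (-o)) none) (PySem.List.slice cb none (some o)) mm
      = o - (pvDiag ca cb).getD ((ca.length : Int) - o) 0 := by
  by_cases h1 : 1 ≤ o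
  · have hkey := pv_key_eq ca cb o h1 h2
    rw [pvHam_eq_of_le _ _ mm (by omega), hkey]
  · have ho : o = 0 := by omega
    subst ho
    rw [pv_zero_hamA ca cb mm, pv_zero_diagB ca cb]
    omega

-- both slices are empty at o ≤ -max(len a, len b) (< 0)
theorem pv_quirk_empty (ca cb : List Char) (o : Int)
    (h1 : o ≤ -(ca.length : Int)) (h2 : o ≤ -(cb.length : Int)) (h3 : o ≤ -1) :
    PySem.List.slice ca (some (-o)) none = PySem.List.slice cb none (some o) := by
  have hA : PySem.List.slice ca (some (-o)) none = [] := by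
    rw [PySem.List.slice_from ca (by omega : (0:Int) ≤ -o)]
    apply List.drop_eq_nil_of_le
    omega
  have hB : PySem.List.slice cb none (some o) = [] := by
    rw [show o = -(((-o).toNat : Nat) : Int) by omega,
        PySem.List.slice_to_neg_natCast cb (-o).toNat (by omega)]
    have : cb.length - (-o).toNat = 0 := by omega
    rw [this]
    simp
  rw [hA, hB]

-- ---- main equivalence, approx branch (mm ≠ 0) ----
theorem pv_approx_main (ca cb : List Char) (ml mm : Int) :
    pvApproxGo ca cb mm
        (PySem.List.pyRange (min (ca.length : Int) (cb.length : Int)) (ml - 1) (-1)) ((0:Int), none)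
      = pvAltApproxGo mm (ca.length : Int) (pvDiag ca cb)
          (PySem.List.pyRange (min (ca.length : Int) (cb.length : Int)) (max ml 0 - 1) (-1)) := by
  set la : Int := (ca.length : Int)
  set lb : Int := (cb.length : Int)
  set m : Int := min la lb with hm
  have hm0 : 0 ≤ m := by positivity
  rw [pvApproxGo_spec, pvAltApproxGo_spec, PySem.List.pyRange_neg_one_eq_reverse,
      PySem.List.pyRange_neg_one_eq_reverse]
  rw [show ml - 1 + 1 = ml by ring, show max ml 0 - 1 + 1 = max ml 0 by ring]
  have hcongr :
      (PySem.List.pyRange ml (m + 1) 1).reverse.find?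
          (fun o => decide (pvHam (PySem.List.slice ca (some (-o)) none) (PySem.List.slice cb none (some o)) mm ≤ mm)
            && decide (0 ≤ o))
        = (PySem.List.pyRange ml (m + 1) 1).reverse.find?
          (fun o => decide (o - (pvDiag ca cb).getD (la - o) 0 ≤ mm) && decide (0 ≤ o)) := by
    apply pv_find?_congr_mem
    intro x hx
    rw [List.mem_reverse] at hx
    have hb := PySem.List.mem_pyRange_one.mp hx
    by_cases hx0 : 0 ≤ x
    · rw [pv_approx_pred_eq ca cb mm x hx0 (by omega)]
    · simp [hx0]
  rw [hcongr, pv_find_clamp ml m hm0 _]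
  cases hfind : (PySem.List.pyRange (max ml 0) (m + 1) 1).reverse.find?
      (fun o => decide (o - (pvDiag ca cb).getD (la - o) 0 ≤ mm)) with
  | none => simp
  | some v =>
    have hv := List.find?_some hfind
    have hmem := List.mem_of_find?_eq_some hfind
    rw [List.mem_reverse] at hmem
    have hb := PySem.List.mem_pyRange_one.mp hmem
    simp only [decide_eq_true_eq] at hv
    have hval := pv_approx_val_eq ca cb mm v (by omega) (by omega) hv
    rw [show ((ca.length : Int)) = la from rfl] at hval
    simp [hval]

-- ---- main equivalence, exact branch (mm = 0), outside the quirky corner ----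
theorem pv_exact_main (ca cb : List Char) (ml : Int)
    (hnd : ¬ (ml ≤ -1 ∧ ca ≠ [] ∧
      ((PySem.List.pyRange 1 (min (ca.length : Int) (cb.length : Int) + 1) 1).all
        (fun o => !decide (PySem.List.slice ca (some (-o)) none = PySem.List.slice cb none (some o)))) = true ∧
      ((PySem.List.pyRange (max ml (-(max (ca.length : Int) (cb.length : Int)))) 0 1).any
        (fun o => decide (PySem.List.slice ca (some (-o)) none = PySem.List.slice cb none (some o)))) = true)) :
    pvExactGo ca cb (PySem.List.pyRange (min (ca.length : Int) (cb.length : Int)) (ml - 1) (-1))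
      = pvAltExactGo (ca.length : Int) (pvDiag ca cb)
          (PySem.List.pyRange (min (ca.length : Int) (cb.length : Int)) (max ml 1 - 1) (-1)) := by
  set la : Int := (ca.length : Int)
  set lb : Int := (cb.length : Int)
  set m : Int := min la lb with hm
  have hm0 : 0 ≤ m := by positivity
  rw [pvExactGo_spec, pvAltExactGo_spec, PySem.List.pyRange_neg_one_eq_reverse,
      PySem.List.pyRange_neg_one_eq_reverse]
  rw [show ml - 1 + 1 = ml by ring, show max ml 1 - 1 + 1 = max ml 1 by ring]
  by_cases hml : 1 ≤ ml
  · rw [max_eq_left hml]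
    have hcongr :
        (PySem.List.pyRange ml (m + 1) 1).reverse.find?
            (fun o => decide (PySem.List.slice ca (some (-o)) none = PySem.List.slice cb none (some o)))
          = (PySem.List.pyRange ml (m + 1) 1).reverse.find?
            (fun o => decide ((pvDiag ca cb).getD (la - o) 0 = o)) := by
      apply pv_find?_congr_mem
      intro x hx
      rw [List.mem_reverse] at hx
      have hb := PySem.List.mem_pyRange_one.mp hx
      exact pv_exact_pred_eq ca cb x (by omega) (by omega)
    rw [hcongr]
  · have hmax : max ml 1 = 1 := max_eq_right (by omega)
    rw [hmax]
    have hsplit : PySem.List.pyRange ml (m + 1) 1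
        = PySem.List.pyRange ml 1 1 ++ PySem.List.pyRange 1 (m + 1) 1 :=
      PySem.List.pyRange_one_append ml 1 (m + 1) (by omega) (by omega)
    rw [hsplit, List.reverse_append, List.find?_append]
    have hcongr :
        (PySem.List.pyRange 1 (m + 1) 1).reverse.find?
            (fun o => decide (PySem.List.slice ca (some (-o)) none = PySem.List.slice cb none (some o)))
          = (PySem.List.pyRange 1 (m + 1) 1).reverse.find?
            (fun o => decide ((pvDiag ca cb).getD (la - o) 0 = o)) := by
      apply pv_find?_congr_mem
      intro x hx
      rw [List.mem_reverse] at hx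
      have hb := PySem.List.mem_pyRange_one.mp hx
      exact pv_exact_pred_eq ca cb x (by omega) (by omega)
    rw [hcongr]
    cases hfq : (PySem.List.pyRange 1 (m + 1) 1).reverse.find?
        (fun o => decide ((pvDiag ca cb).getD (la - o) 0 = o)) with
    | some v => simp
    | none =>
      simp only [Option.none_or]
      -- B side is 0; show A's scan over [0, -1, ..., ml] finds nothing (or finds 0)
      have hsplit2 : PySem.List.pyRange ml 1 1
          = PySem.List.pyRange ml 0 1 ++ PySem.List.pyRange 0 1 1 :=
        PySem.List.pyRange_one_append ml 0 1 (by omega) (by omega)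
      have h01 : PySem.List.pyRange (0:Int) 1 1 = [0] := by decide
      rw [hsplit2, h01, List.reverse_append]
      show ((((0:Int) :: []).reverse ++ (PySem.List.pyRange ml 0 1).reverse).find? _ ).getD 0 = (none : Option Int).getD 0
      simp only [List.reverse_cons, List.reverse_nil, List.nil_append, List.cons_append,
        List.nil_append]
      have hP0 : (PySem.List.slice ca (some (-(0:Int))) none = PySem.List.slice cb none (some (0:Int))) ↔ ca = [] := by
        rw [pv_sliceB cb 0 (by omega)]
        norm_num
      by_cases hca : ca = []
      · rw [List.find?_cons_of_pos (by simpa using hP0.mpr hca)]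
        rfl
      · rw [List.find?_cons_of_neg (by simpa using fun h => hca (hP0.mp h))]
        by_cases hml0 : ml = 0
        · subst hml0
          rw [show PySem.List.pyRange (0:Int) 0 1 = [] by decide]
          rfl
        · -- ml ≤ -1: use ¬D components
          have hml1 : ml ≤ -1 := by omega
          have hall : ((PySem.List.pyRange 1 (m + 1) 1).all
              (fun o => !decide (PySem.List.slice ca (some (-o)) none = PySem.List.slice cb none (some o)))) = true := by
            rw [List.all_eq_true]
            intro x hx
            have hnp := List.find?_eq_none.mp hfq x (List.mem_reverse.mpr hx)
            have hb := PySem.List.mem_pyRange_one.mp hx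
            have := pv_exact_pred_eq ca cb x (by omega) (by omega)
            simp only [Bool.not_eq_true'] at *
            rw [this]
            simpa using hnp
          have hanyf : ¬ (((PySem.List.pyRange (max ml (-(max la lb))) 0 1).any
              (fun o => decide (PySem.List.slice ca (some (-o)) none = PySem.List.slice cb none (some o)))) = true) :=
            fun h => hnd ⟨hml1, hca, hall, h⟩
          have hla1 : 1 ≤ la := by
            have : ca.length ≠ 0 := fun h => hca (List.length_eq_zero_iff.mp h)
            omega
          have hmlgt : -(max la lb) < ml := by
            by_contra hcon
            push_neg at hcon
            apply hanyf
            rw [List.any_eq_true]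
            refine ⟨-(max la lb), ?_, ?_⟩
            · rw [PySem.List.mem_pyRange_one]
              constructor
              · exact max_le hcon (le_refl _)
              · omega
            · rw [decide_eq_true_eq]
              exact pv_quirk_empty ca cb (-(max la lb)) (by omega) (by omega) (by omega)
          have hmax2 : max ml (-(max la lb)) = ml := max_eq_left (by omega)
          rw [hmax2] at hanyf
          have hfn : (PySem.List.pyRange ml 0 1).reverse.find?
              (fun o => decide (PySem.List.slice ca (some (-o)) none = PySem.List.slice cb none (some o))) = none := by
            rw [List.find?_eq_none]
            intro x hx
            rw [List.mem_reverse] at hx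
            intro hpx
            exact hanyf (List.any_eq_true.mpr ⟨x, hx, hpx⟩)
          rw [hfn]

-- ---- inside D_: A's first component is negative while B returns 0 ----
theorem pv_exact_tight (ca cb : List Char) (ml : Int)
    (hml : ml ≤ -1) (hca : ca ≠ [])
    (hall : ((PySem.List.pyRange 1 (min (ca.length : Int) (cb.length : Int) + 1) 1).all
        (fun o => !decide (PySem.List.slice ca (some (-o)) none = PySem.List.slice cb none (some o)))) = true)
    (hany : ((PySem.List.pyRange (max ml (-(max (ca.length : Int) (cb.length : Int)))) 0 1).any
        (fun o => decide (PySem.List.slice ca (some (-o)) none = PySem.List.slice cb none (some o)))) = true) :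
    pvExactGo ca cb (PySem.List.pyRange (min (ca.length : Int) (cb.length : Int)) (ml - 1) (-1)) ≤ -1
      ∧ pvAltExactGo (ca.length : Int) (pvDiag ca cb)
          (PySem.List.pyRange (min (ca.length : Int) (cb.length : Int)) (max ml 1 - 1) (-1)) = 0 := by
  set la : Int := (ca.length : Int)
  set lb : Int := (cb.length : Int)
  set m : Int := min la lb with hm
  have hm0 : 0 ≤ m := by positivity
  have hBzero : pvAltExactGo la (pvDiag ca cb) (PySem.List.pyRange m (max ml 1 - 1) (-1)) = 0 := by
    rw [pvAltExactGo_spec, PySem.List.pyRange_neg_one_eq_reverse,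
        show max ml 1 - 1 + 1 = max ml 1 by ring, max_eq_right (by omega : ml ≤ 1)]
    have hfn : (PySem.List.pyRange 1 (m + 1) 1).reverse.find?
        (fun o => decide ((pvDiag ca cb).getD (la - o) 0 = o)) = none := by
      rw [List.find?_eq_none]
      intro x hx
      rw [List.mem_reverse] at hx
      have hb := PySem.List.mem_pyRange_one.mp hx
      have hax := List.all_eq_true.mp hall x hx
      rw [← pv_exact_pred_eq ca cb x (by omega) (by omega)]
      simpa using hax
    rw [hfn]
    rfl
  refine ⟨?_, hBzero⟩
  rw [pvExactGo_spec, PySem.List.pyRange_neg_one_eq_reverse, show ml - 1 + 1 = ml by ring]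
  have hsplit : PySem.List.pyRange ml (m + 1) 1
      = PySem.List.pyRange ml 1 1 ++ PySem.List.pyRange 1 (m + 1) 1 :=
    PySem.List.pyRange_one_append ml 1 (m + 1) (by omega) (by omega)
  rw [hsplit, List.reverse_append, List.find?_append]
  have hfq : (PySem.List.pyRange 1 (m + 1) 1).reverse.find?
      (fun o => decide (PySem.List.slice ca (some (-o)) none = PySem.List.slice cb none (some o))) = none := by
    rw [List.find?_eq_none]
    intro x hx
    rw [List.mem_reverse] at hx
    have hax := List.all_eq_true.mp hall x hx
    simpa using hax
  rw [hfq]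
  simp only [Option.none_or]
  have hsplit2 : PySem.List.pyRange ml 1 1
      = PySem.List.pyRange ml 0 1 ++ PySem.List.pyRange 0 1 1 :=
    PySem.List.pyRange_one_append ml 0 1 (by omega) (by omega)
  have h01 : PySem.List.pyRange (0:Int) 1 1 = [0] := by decide
  rw [hsplit2, h01, List.reverse_append]
  simp only [List.reverse_cons, List.reverse_nil, List.nil_append, List.cons_append, List.nil_append]
  have hP0 : ¬ (PySem.List.slice ca (some (-(0:Int))) none = PySem.List.slice cb none (some (0:Int))) := by
    rw [pv_sliceB cb 0 (by omega)]
    norm_num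
    intro h
    exact hca (by simpa [PySem.List.slice_none_none] using h)
  rw [List.find?_cons_of_neg (by simpa using hP0)]
  obtain ⟨w, hwmem, hwp⟩ := List.any_eq_true.mp hany
  have hwb := PySem.List.mem_pyRange_one.mp hwmem
  have hwmem2 : w ∈ (PySem.List.pyRange ml 0 1).reverse := by
    rw [List.mem_reverse, PySem.List.mem_pyRange_one]
    constructor
    · have := hwb.1
      have h2 : ml ≤ max ml (-(max la lb)) := le_max_left _ _
      omega
    · exact hwb.2
  have hsome : ((PySem.List.pyRange ml 0 1).reverse.find?
      (fun o => decide (PySem.List.slice ca (some (-o)) none = PySem.List.slice cb none (some o)))).isSome := by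
    rw [List.find?_isSome]
    exact ⟨w, hwmem2, hwp⟩
  obtain ⟨v, hv⟩ := Option.isSome_iff_exists.mp hsome
  have hvmem := List.mem_of_find?_eq_some hv
  rw [List.mem_reverse] at hvmem
  have hvb := PySem.List.mem_pyRange_one.mp hvmem
  rw [hv]
  simp
  omega

-- ===== VERDICT (by name: the statements are the Claim_ definitions above) =====
theorem linear_overlap_approx_spec : Claim_unchanged_linear_overlap_approx := by
  intro a b ml mm _
  unfold Spec_linear_overlap_approx
  intro hnd
  unfold linear_overlap_approx linear_overlap_approx_alt pvExact
  by_cases hmm : mm = 0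
  · simp only [hmm, eq_self_iff_true, if_true]
    have hnd' : ¬ (ml ≤ -1 ∧ a.toList ≠ [] ∧
        ((PySem.List.pyRange 1 (min (a.toList.length : Int) (b.toList.length : Int) + 1) 1).all
          (fun o => !decide (PySem.List.slice a.toList (some (-o)) none = PySem.List.slice b.toList none (some o)))) = true ∧
        ((PySem.List.pyRange (max ml (-(max (a.toList.length : Int) (b.toList.length : Int)))) 0 1).any
          (fun o => decide (PySem.List.slice a.toList (some (-o)) none = PySem.List.slice b.toList none (some o)))) = true) := by
      intro hrest
      exact hnd ⟨hmm, hrest⟩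
    rw [pvExactLoop_eq a.toList b.toList (ml - 1) _ _ rfl,
        pv_exact_main a.toList b.toList ml hnd']
  · simp only [if_neg hmm]
    rw [pvApproxLoop_eq a.toList b.toList mm (ml - 1) _ _ _ rfl]
    exact pv_approx_main a.toList b.toList ml mm

theorem linear_overlap_approx_changed : Claim_changed_linear_overlap_approx := by
  unfold Claim_changed_linear_overlap_approx
  decide

theorem linear_overlap_approx_tight : Claim_exact_linear_overlap_approx := by
  intro a b ml mm _ hD
  obtain ⟨hmm, hml, hca, hall, hany⟩ := hD
  unfold linear_overlap_approx linear_overlap_approx_alt pvExact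
  simp only [hmm, eq_self_iff_true, if_true]
  obtain ⟨hA1, hB1⟩ := pv_exact_tight a.toList b.toList ml hml hca hall hany
  rw [pvExactLoop_eq a.toList b.toList (ml - 1) _ _ rfl]
  intro heq
  have h1 := congrArg Prod.fst heq
  simp only at h1
  omega
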